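-- pv_equiv track=rewrite | github.com/JJckrbbt/StaticSite | src/block_markdown.py | strip_carrots
-- ===== SOURCE A (Python) =====
-- def strip_carrots(text):
--     lines = text.split("\n")
--     new_lines = []
--     for line in lines:
--         line = line.lstrip(">")
--         new_lines.append(line)
--     new_text = "\n".join(new_lines)
--     return new_text
-- ===== SOURCE B (Python) =====
-- def strip_carrots(text):
--     out = []
--     at_start = True
--     for ch in text:
--         if ch == "\n":
--             out.append(ch)
--             at_start = True
--         elif at_start and ch == ">":
--             continue
--         else:
--             out.append(ch)
--             at_start = False
--     return "".join(out)
-- ===== Notes on version B (the rewrite author's own statement) =====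
-- stated objective: alternative
-- what changed: Replaced the split-on-newline / per-line left-strip / join pipeline by a single left-to-right character scan keeping an at-line-start flag that skips the leading run of greater-than characters on each line.
import Mathlib
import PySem

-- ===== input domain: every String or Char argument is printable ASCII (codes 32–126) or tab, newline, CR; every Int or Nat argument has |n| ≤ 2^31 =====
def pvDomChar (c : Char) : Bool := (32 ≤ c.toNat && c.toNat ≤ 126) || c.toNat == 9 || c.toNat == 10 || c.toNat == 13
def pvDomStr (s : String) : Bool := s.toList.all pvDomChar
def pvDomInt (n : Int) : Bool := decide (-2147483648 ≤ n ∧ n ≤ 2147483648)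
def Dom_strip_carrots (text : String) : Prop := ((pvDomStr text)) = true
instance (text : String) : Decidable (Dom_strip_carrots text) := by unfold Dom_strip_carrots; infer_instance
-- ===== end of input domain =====

-- B replaces the split / per-line lstrip('>') / join of A by a single left-to-right
-- character scan with an at-line-start flag (alternative decomposition, same cost).


-- ===== PORT A =====
-- text.split("\n"); line.lstrip(">") is ported by hand as dropWhile (· == '>'),
-- exact: Python lstrip(">") removes exactly the leading run of '>' characters.
def strip_carrots (text : String) : String :=
  let lines := (PySem.Str.split? text "\n").getD []
  let new_lines := lines.foldl
    (fun acc line => acc ++ [String.ofList (line.toList.dropWhile (fun c => c == '>'))]) []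
  PySem.Str.join "\n" new_lines

-- ===== PORT B =====
-- one fold over the characters; state = (output so far, at-line-start flag)
def pvAltStep (st : List Char × Bool) (ch : Char) : List Char × Bool :=
  if ch = '\n' then (st.1 ++ [ch], true)
  else if st.2 = true ∧ ch = '>' then st
  else (st.1 ++ [ch], false)

def strip_carrots_alt (text : String) : String :=
  String.ofList (text.toList.foldl pvAltStep ([], true)).1

-- ===== PRECONDITION & SPEC =====
def Spec_strip_carrots (text : String) (out : String) : Prop := out = strip_carrots_alt text
instance (text : String) (out : String) : Decidable (Spec_strip_carrots text out) := by unfold Spec_strip_carrots; infer_instance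

-- ===== CLAIM (what is proved, stated in full; the proofs are below) =====
def Claim_equal_strip_carrots : Prop := ∀ (text : String), Dom_strip_carrots text → Spec_strip_carrots text (strip_carrots text)

-- ===== LEMMAS AND PROOFS =====

-- reference recursion for splitting on '\n'
def pvSplitNL : List Char → List (List Char)
  | [] => [[]]
  | c :: cs => if c = '\n' then [] :: pvSplitNL cs else (pvSplitNL cs).modifyHead (c :: ·)

lemma pvSplitNL_ne_nil (cs : List Char) : ∃ x r, pvSplitNL cs = x :: r := by
  cases cs with
  | nil => exact ⟨[], [], rfl⟩
  | cons c cs =>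
    simp only [pvSplitNL]
    split
    · exact ⟨[], pvSplitNL cs, rfl⟩
    · obtain ⟨x, r, h⟩ := pvSplitNL_ne_nil cs
      exact ⟨c :: x, r, by simp [h]⟩

-- the fuel-based PySem splitOn agrees with pvSplitNL for sep = ['\n']
lemma pvGo_spec (fuel : Nat) (l cur : List Char) (acc : List (List Char))
    (h : l.length < fuel) :
    PySem.Chars.splitOn.go ['\n'] fuel l cur acc
      = acc.reverse ++ (pvSplitNL l).modifyHead (cur.reverse ++ ·) := by
  induction fuel generalizing l cur acc with
  | zero => omega
  | succ fuel ih =>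
    cases l with
    | nil => simp [PySem.Chars.splitOn.go, pvSplitNL]
    | cons c rest =>
      simp only [PySem.Chars.splitOn.go]
      by_cases hc : c = '\n'
      · subst hc
        have hp : List.isPrefixOf ['\n'] ('\n' :: rest) = true := by
          simp [List.isPrefixOf]
        rw [if_pos hp]
        have := ih rest [] (cur.reverse :: acc) (by simpa using Nat.lt_of_succ_lt_succ h)
        simp only [List.length_cons, List.length_nil, List.drop_succ_cons,
          List.drop_zero] at this ⊢
        rw [this]
        obtain ⟨x, r, hx⟩ := pvSplitNL_ne_nil rest
        simp [pvSplitNL, hx]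
      · have hp : List.isPrefixOf ['\n'] (c :: rest) = false := by
          simp [List.isPrefixOf]; intro h'; exact absurd h'.symm hc
        rw [if_neg (by simp [hp])]
        have := ih rest (c :: cur) acc (by simpa using Nat.lt_of_succ_lt_succ h)
        rw [this]
        obtain ⟨x, r, hx⟩ := pvSplitNL_ne_nil rest
        simp [pvSplitNL, hc, hx]

lemma pvSplitOn_eq (cs : List Char) :
    PySem.Chars.splitOn cs ['\n'] = pvSplitNL cs := by
  obtain ⟨x, r, hx⟩ := pvSplitNL_ne_nil cs
  have := pvGo_spec (cs.length + 1) cs [] [] (by omega)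
  simpa [PySem.Chars.splitOn, hx] using this

lemma pvSplitNL_nl (cs : List Char) : pvSplitNL ('\n' :: cs) = [] :: pvSplitNL cs := by
  simp [pvSplitNL]

-- the B-side state machine as a function of the remaining input
def pvM : Bool → List Char → List Char
  | _, [] => []
  | b, c :: cs =>
    if c = '\n' then '\n' :: pvM true cs
    else if b = true ∧ c = '>' then pvM true cs
    else c :: pvM false cs

lemma pvFoldl_spec (cs : List Char) (acc : List Char) (b : Bool) :
    (cs.foldl pvAltStep (acc, b)).1 = acc ++ pvM b cs := by
  induction cs generalizing acc b with
  | nil => simp [pvM]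
  | cons c cs ih =>
    simp only [List.foldl_cons, pvAltStep, pvM]
    by_cases hc : c = '\n'
    · subst hc; simp [ih]
    · rw [if_neg hc, if_neg hc]
      by_cases hb : b = true ∧ c = '>'
      · rw [if_pos hb, if_pos hb, ih]
        obtain ⟨hb1, _⟩ := hb; subst hb1; rfl
      · rw [if_neg hb, if_neg hb]
        simp [ih]

-- join over cons-on-head commutes
lemma pvJoin_cons_head (sep x : List Char) (c : Char) (r : List (List Char)) :
    PySem.Chars.join sep ((c :: x) :: r) = c :: PySem.Chars.join sep (x :: r) := by
  cases r with
  | nil => simp [PySem.Chars.join, List.intercalate]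
  | cons y r => simp [PySem.Chars.join, List.intercalate, List.intersperse]

lemma pvJoin_nil_cons (sep : List Char) (x : List Char) (r : List (List Char)) :
    PySem.Chars.join sep ([] :: x :: r) = sep ++ PySem.Chars.join sep (x :: r) := by
  simp [PySem.Chars.join, List.intercalate, List.intersperse]

-- the key equivalence: A's join∘map-dropWhile∘split equals B's state machine,
-- proved jointly for the at-line-start and mid-line states
lemma pvMain (cs : List Char) :
    PySem.Chars.join ['\n'] ((pvSplitNL cs).map (List.dropWhile (fun c => c == '>')))
        = pvM true cs
    ∧ ∀ x r, pvSplitNL cs = x :: r →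
        PySem.Chars.join ['\n'] (x :: r.map (List.dropWhile (fun c => c == '>')))
          = pvM false cs := by
  induction cs with
  | nil =>
    constructor
    · simp [pvSplitNL, pvM, PySem.Chars.join, List.intercalate]
    · intro x r h
      simp only [pvSplitNL] at h
      cases h
      simp [pvM, PySem.Chars.join, List.intercalate]
  | cons c cs ih =>
    obtain ⟨x, r, hx⟩ := pvSplitNL_ne_nil cs
    obtain ⟨ih1, ih2⟩ := ih
    by_cases hc : c = '\n'
    · subst hc
      constructor
      · rw [pvSplitNL_nl, List.map_cons, hx, List.map_cons,
          show List.dropWhile (fun c => c == '>') ([] : List Char) = [] from rfl,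
          pvJoin_nil_cons, ← List.map_cons, ← hx, ih1]
        simp [pvM]
      · intro y s h
        rw [pvSplitNL_nl] at h
        cases h
        rw [hx, List.map_cons, pvJoin_nil_cons, ← List.map_cons, ← hx, ih1]
        simp [pvM]
    · have hsplit : pvSplitNL (c :: cs) = (c :: x) :: r := by
        simp [pvSplitNL, hc, hx]
      by_cases hg : c = '>'
      · subst hg
        constructor
        · rw [hsplit, List.map_cons]
          have : List.dropWhile (fun c => c == '>') ('>' :: x)
              = List.dropWhile (fun c => c == '>') x := by
            simp [List.dropWhile]
          rw [this, ← List.map_cons, ← hx, ih1]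
          simp [pvM]
        · intro y s h
          rw [hsplit] at h; cases h
          rw [pvJoin_cons_head, ih2 x r hx]
          simp [pvM]
      · constructor
        · rw [hsplit, List.map_cons]
          have hgb : (c == '>') = false := by simp [hg]
          have : List.dropWhile (fun c => c == '>') (c :: x) = c :: x := by
            simp [List.dropWhile, hgb]
          rw [this, pvJoin_cons_head, ih2 x r hx]
          simp [pvM, hc, hg]
        · intro y s h
          rw [hsplit] at h; cases h
          rw [pvJoin_cons_head, ih2 x r hx]
          simp [pvM, hc, hg]

lemma pvFoldl_map (lines : List String) (acc : List String) :
    lines.foldl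
      (fun acc line => acc ++ [String.ofList (line.toList.dropWhile (fun c => c == '>'))]) acc
    = acc ++ lines.map (fun line => String.ofList (line.toList.dropWhile (fun c => c == '>'))) := by
  induction lines generalizing acc with
  | nil => simp
  | cons l ls ih => simp [ih]

-- ===== VERDICT (by name: the statement is the Claim_ definition above) =====
theorem strip_carrots_spec : Claim_equal_strip_carrots := by
  intro text _
  show strip_carrots text = strip_carrots_alt text
  unfold strip_carrots strip_carrots_alt
  have hsep : ("\n" : String).toList = ['\n'] := rfl
  rw [PySem.Str.split?]
  simp only [hsep, PySem.Chars.split?, List.isEmpty_cons, if_neg Bool.false_ne_true,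
    Option.map_some, Option.getD_some]
  rw [pvSplitOn_eq, pvFoldl_map, List.nil_append, List.map_map]
  rw [PySem.Str.join, pvFoldl_spec, List.nil_append]
  congr 1
  rw [hsep, ← (pvMain text.toList).1, List.map_map]
  simp [Function.comp_def]
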